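-- pv_equiv track=rewrite | github.com/abhisindh/exam-timetabling-problem | scripts/trials.py | calculate_proximity_penalty
-- ===== SOURCE A (Python) =====
-- def calculate_proximity_penalty(timetable, students_courses, days_assigned):
--     """
--     Calculate the proximity penalty for a given timetable.
--
--     Parameters:
--     timetable (Timetable): The timetable.
--     students_courses (list): A list of lists where each sublist contains the courses a student is taking.
--     days_assigned (dict): A dictionary mapping each course to the day it is assigned.
--
--     Returns:
--     int: The total proximity penalty for the timetable.
--     """
--     total_penalty = 0
--     for student_courses in students_courses:
--         for i in range(len(student_courses)):
--             for j in range(i + 1, len(student_courses)):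
--                 course1 = student_courses[i]
--                 course2 = student_courses[j]
--                 day1 = days_assigned.get(course1, -1)
--                 day2 = days_assigned.get(course2, -1)
--                 if day1 != -1 and day2 != -1:
--                     proximity = abs(day1 - day2)
--                     penalty = proximity ** 2
--                     total_penalty += penalty
--     return total_penalty
-- ===== SOURCE B (Python) =====
-- def calculate_proximity_penalty(timetable, students_courses, days_assigned):
--     # One pass per student: collect count/sum/sum-of-squares of the assigned days,
--     # then use the identity  sum_{i<j} (d_i - d_j)^2 = n*sum(d^2) - (sum d)^2.
--     total_penalty = 0
--     for student_courses in students_courses: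
--         n = 0
--         s = 0
--         sq = 0
--         for course in student_courses:
--             day = days_assigned.get(course, -1)
--             if day != -1:
--                 n += 1
--                 s += day
--                 sq += day * day
--         total_penalty += n * sq - s * s
--     return total_penalty
-- ===== Notes on version B (the rewrite author's own statement) =====
-- stated objective: faster
-- what changed: Replaces the per-student quadratic double loop over course pairs by a single pass collecting count/sum/sum-of-squares of assigned days and the identity sum_{i<j}(d_i-d_j)^2 = n*sum(d^2) - (sum d)^2.
import Mathlib
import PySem

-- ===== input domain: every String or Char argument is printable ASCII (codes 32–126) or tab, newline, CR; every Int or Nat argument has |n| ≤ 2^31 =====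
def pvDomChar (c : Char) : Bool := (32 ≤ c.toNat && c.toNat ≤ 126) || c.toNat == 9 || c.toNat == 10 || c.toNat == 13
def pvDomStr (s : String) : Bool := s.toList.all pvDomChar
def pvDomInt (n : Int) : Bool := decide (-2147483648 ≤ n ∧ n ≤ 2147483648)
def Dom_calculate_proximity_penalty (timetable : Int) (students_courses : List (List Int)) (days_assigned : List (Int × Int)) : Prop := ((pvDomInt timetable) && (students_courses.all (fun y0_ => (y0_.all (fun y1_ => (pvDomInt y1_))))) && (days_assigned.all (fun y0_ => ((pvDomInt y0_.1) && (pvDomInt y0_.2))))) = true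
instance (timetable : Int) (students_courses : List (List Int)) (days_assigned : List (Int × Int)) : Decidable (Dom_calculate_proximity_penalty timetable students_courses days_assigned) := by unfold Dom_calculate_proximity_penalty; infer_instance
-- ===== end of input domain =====

-- B replaces A's per-student double loop over course pairs by one pass collecting
-- count/sum/sum-of-squares of the assigned days and the identity
-- Σ_{i<j}(d_i-d_j)² = n·Σd² − (Σd)²  (objective: faster).

-- ===== PORT A =====
-- literal port of A's triple loop; indices produced by range(...) are always in range,
-- so pyGetD with default 0 is exact here
def calculate_proximity_penalty (timetable : Int) (students_courses : List (List Int)) (days_assigned : List (Int × Int)) : Int :=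
  students_courses.foldl (fun total_penalty student_courses =>
    (PySem.List.pyRange 0 (student_courses.length : Int) 1).foldl (fun total_penalty i =>
      (PySem.List.pyRange (i + 1) (student_courses.length : Int) 1).foldl (fun total_penalty j =>
        let course1 := PySem.List.pyGetD student_courses i 0
        let course2 := PySem.List.pyGetD student_courses j 0
        let day1 := (PySem.Dict.mk days_assigned).getD course1 (-1)
        let day2 := (PySem.Dict.mk days_assigned).getD course2 (-1)
        if day1 ≠ -1 ∧ day2 ≠ -1 then total_penalty + |day1 - day2| ^ 2 else total_penalty)
        total_penalty)
      total_penalty)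
    0

-- ===== PORT B =====
def calculate_proximity_penalty_alt (timetable : Int) (students_courses : List (List Int)) (days_assigned : List (Int × Int)) : Int :=
  students_courses.foldl (fun total_penalty student_courses =>
    let st := student_courses.foldl (fun (acc : Int × Int × Int) course =>
      let day := (PySem.Dict.mk days_assigned).getD course (-1)
      if day ≠ -1 then (acc.1 + 1, acc.2.1 + day, acc.2.2 + day * day) else acc)
      (0, 0, 0)
    total_penalty + st.1 * st.2.2 - st.2.1 * st.2.1)
    0

-- ===== PRECONDITION & SPEC =====
def Spec_calculate_proximity_penalty (timetable : Int) (students_courses : List (List Int)) (days_assigned : List (Int × Int)) (out : Int) : Prop := out = calculate_proximity_penalty_alt timetable students_courses days_assigned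
instance (timetable : Int) (students_courses : List (List Int)) (days_assigned : List (Int × Int)) (out : Int) : Decidable (Spec_calculate_proximity_penalty timetable students_courses days_assigned out) := by unfold Spec_calculate_proximity_penalty; infer_instance

-- ===== CLAIM (what is proved, stated in full; the proofs are below) =====
def Claim_equal_calculate_proximity_penalty : Prop := ∀ (timetable : Int) (students_courses : List (List Int)) (days_assigned : List (Int × Int)), Dom_calculate_proximity_penalty timetable students_courses days_assigned → Spec_calculate_proximity_penalty timetable students_courses days_assigned (calculate_proximity_penalty timetable students_courses days_assigned)

-- ===== LEMMAS AND PROOFS =====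

-- pairwise penalty of two courses under the lookup `look`
def pvPen (look : Int → Int) (c1 c2 : Int) : Int :=
  if look c1 ≠ -1 ∧ look c2 ≠ -1 then |look c1 - look c2| ^ 2 else 0

-- sum of pvPen over all unordered pairs, front recursion
def pvPairSum (look : Int → Int) : List Int → Int
  | [] => 0
  | c :: rest => ((rest.map (pvPen look c)).sum) + pvPairSum look rest

-- the assigned days of a student's courses
def pvDays (look : Int → Int) (sc : List Int) : List Int :=
  (sc.map look).filter (fun d => d ≠ -1)

-- A's inner j-loop is a sum over the tail of the course list
lemma pvInner (look : Int → Int) (sc : List Int) (i : Int) (hi : 0 ≤ i) (t : Int) :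
    (PySem.List.pyRange (i + 1) (sc.length : Int) 1).foldl (fun t j =>
        if look (PySem.List.pyGetD sc i 0) ≠ -1 ∧ look (PySem.List.pyGetD sc j 0) ≠ -1
        then t + |look (PySem.List.pyGetD sc i 0) - look (PySem.List.pyGetD sc j 0)| ^ 2 else t) t
    = t + ((sc.drop (i + 1).toNat).map (pvPen look (PySem.List.pyGetD sc i 0))).sum := by
  have hb : (fun (t : Int) j => if look (PySem.List.pyGetD sc i 0) ≠ -1 ∧ look (PySem.List.pyGetD sc j 0) ≠ -1
        then t + |look (PySem.List.pyGetD sc i 0) - look (PySem.List.pyGetD sc j 0)| ^ 2 else t)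
      = fun (t : Int) j => t + pvPen look (PySem.List.pyGetD sc i 0) (PySem.List.pyGetD sc j 0) := by
    funext t j
    simp only [pvPen]
    split_ifs <;> simp
  rw [hb, PySem.List.foldl_add]
  rw [show (fun j => pvPen look (PySem.List.pyGetD sc i 0) (PySem.List.pyGetD sc j 0))
        = (pvPen look (PySem.List.pyGetD sc i 0)) ∘ (fun j => PySem.List.pyGetD sc j 0) from rfl]
  rw [← List.map_map, PySem.List.map_pyGetD_pyRange' sc 0 (by omega)]

-- the mapped sum over range(len(sc)) is pvPairSum
lemma pvRangeSum (look : Int → Int) (sc : List Int) :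
    ((PySem.List.pyRange 0 (sc.length : Int) 1).map (fun i =>
       ((sc.drop (i + 1).toNat).map (pvPen look (PySem.List.pyGetD sc i 0))).sum)).sum
      = pvPairSum look sc := by
  induction sc with
  | nil => simp [pvPairSum]
  | cons c rest ih =>
    rw [show ((c :: rest).length : Int) = ((rest.length + 1 : Nat) : Int) by simp]
    rw [PySem.List.pyRange_zero_natCast (rest.length + 1), List.range_succ_eq_map]
    rw [PySem.List.pyRange_zero_natCast rest.length] at ih
    simp only [List.map_cons, List.map_map, List.sum_cons]
    rw [pvPairSum]
    congr 1
    · norm_num [PySem.List.pyGetD_zero_cons]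
    · rw [← ih, List.map_map]
      apply congrArg
      apply List.map_congr_left
      intro k _
      simp only [Function.comp_apply]
      have h1 : ((Nat.succ k : Nat) : Int) + 1 = ((k + 2 : Nat) : Int) := by push_cast; ring
      have h2 : ((k : Nat) : Int) + 1 = ((k + 1 : Nat) : Int) := by push_cast; ring
      rw [h1, h2, Int.toNat_natCast, Int.toNat_natCast, List.drop_succ_cons]
      rw [show ((Nat.succ k : Nat) : Int) = ((k + 1 : Nat) : Int) by push_cast; ring]
      rw [PySem.List.pyGetD_natCast, PySem.List.pyGetD_natCast, List.getD_cons_succ]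

-- A's double index loop over a student's courses computes pvPairSum
lemma pvOuter (look : Int → Int) (sc : List Int) (t : Int) :
    (PySem.List.pyRange 0 (sc.length : Int) 1).foldl (fun t i =>
      (PySem.List.pyRange (i + 1) (sc.length : Int) 1).foldl (fun t j =>
        if look (PySem.List.pyGetD sc i 0) ≠ -1 ∧ look (PySem.List.pyGetD sc j 0) ≠ -1
        then t + |look (PySem.List.pyGetD sc i 0) - look (PySem.List.pyGetD sc j 0)| ^ 2 else t) t) t
    = t + pvPairSum look sc := by
  rw [PySem.List.foldl_congr_mem _ _ (fun t i =>
        t + ((sc.drop (i + 1).toNat).map (pvPen look (PySem.List.pyGetD sc i 0))).sum) t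
      (fun acc x hx => pvInner look sc x (PySem.List.mem_pyRange_one.mp hx).1 acc)]
  rw [PySem.List.foldl_add, pvRangeSum]


-- B's one-pass fold computes (count, sum, sum of squares) of the assigned days
lemma pvStats (look : Int → Int) (sc : List Int) (a b c : Int) :
    sc.foldl (fun (acc : Int × Int × Int) course =>
        if look course ≠ -1 then (acc.1 + 1, acc.2.1 + look course, acc.2.2 + look course * look course) else acc)
      (a, b, c)
    = (a + ((pvDays look sc).length : Int), b + (pvDays look sc).sum,
       c + ((pvDays look sc).map (fun d => d * d)).sum) := by
  induction sc generalizing a b c with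
  | nil => simp [pvDays]
  | cons course sc ih =>
    rw [List.foldl_cons]
    by_cases h : look course = -1
    · rw [if_neg (by simp [h]), ih]
      simp [pvDays, h]
    · rw [if_pos h, ih]
      have hv : pvDays look (course :: sc) = look course :: pvDays look sc := by
        simp [pvDays, h]
      rw [hv]
      simp only [List.length_cons, List.sum_cons, List.map_cons, Prod.ext_iff]
      refine ⟨by push_cast; ring, by ring, by ring⟩

-- Σ over assigned days of (d - b)² in closed form
lemma pvRowSum (d : Int) (v : List Int) :
    (v.map (fun b => |d - b| ^ 2)).sum
      = (v.length : Int) * (d * d) - 2 * d * v.sum + (v.map (fun b => b * b)).sum := by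
  induction v with
  | nil => simp
  | cons b v ih =>
    simp only [List.map_cons, List.sum_cons, List.length_cons]
    rw [ih, sq_abs]
    push_cast
    ring

-- summing a guarded function over courses = summing over the assigned days
lemma pvFilterSum (look : Int → Int) (g : Int → Int) (l : List Int) :
    (l.map (fun x => if look x ≠ -1 then g (look x) else 0)).sum
      = ((pvDays look l).map g).sum := by
  induction l with
  | nil => simp [pvDays]
  | cons x l ih =>
    rw [List.map_cons, List.sum_cons]
    by_cases h : look x = -1
    · have hv : pvDays look (x :: l) = pvDays look l := by simp [pvDays, h]
      rw [hv, if_neg (by simp [h]), zero_add, ih]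
    · have hv : pvDays look (x :: l) = look x :: pvDays look l := by simp [pvDays, h]
      rw [hv, List.map_cons, List.sum_cons, if_pos h, ih]

-- the algebraic identity: pair sum = n·Σd² − (Σd)²
lemma pvKey (look : Int → Int) (sc : List Int) :
    pvPairSum look sc
      = ((pvDays look sc).length : Int) * ((pvDays look sc).map (fun d => d * d)).sum
        - (pvDays look sc).sum * (pvDays look sc).sum := by
  induction sc with
  | nil => simp [pvPairSum, pvDays]
  | cons c rest ih =>
    simp only [pvPairSum]
    by_cases h : look c = -1
    · have h1 : (rest.map (pvPen look c)).sum = 0 := by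
        apply List.sum_eq_zero
        intro x hx
        obtain ⟨y, _, rfl⟩ := List.mem_map.mp hx
        simp [pvPen, h]
      have hv : pvDays look (c :: rest) = pvDays look rest := by simp [pvDays, h]
      rw [h1, hv, zero_add, ih]
    · rw [show pvPen look c = (fun x => if look x ≠ -1 then (fun b => |look c - b| ^ 2) (look x) else 0)
          from funext fun x => by simp [pvPen, h]]
      rw [pvFilterSum look (fun b => |look c - b| ^ 2) rest, pvRowSum (look c) (pvDays look rest)]
      have hv : pvDays look (c :: rest) = look c :: pvDays look rest := by simp [pvDays, h]
      rw [hv, ih]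
      simp only [List.length_cons, List.sum_cons, List.map_cons]
      push_cast
      ring

-- ===== VERDICT (by name: the statement is the Claim_ definition above) =====
theorem calculate_proximity_penalty_spec : Claim_equal_calculate_proximity_penalty := by
  intro timetable scs days hdom
  clear hdom
  unfold Spec_calculate_proximity_penalty calculate_proximity_penalty calculate_proximity_penalty_alt
  suffices h : ∀ t : Int,
      scs.foldl (fun total_penalty student_courses =>
        (PySem.List.pyRange 0 (student_courses.length : Int) 1).foldl (fun total_penalty i =>
          (PySem.List.pyRange (i + 1) (student_courses.length : Int) 1).foldl (fun total_penalty j =>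
            let course1 := PySem.List.pyGetD student_courses i 0
            let course2 := PySem.List.pyGetD student_courses j 0
            let day1 := (PySem.Dict.mk days).getD course1 (-1)
            let day2 := (PySem.Dict.mk days).getD course2 (-1)
            if day1 ≠ -1 ∧ day2 ≠ -1 then total_penalty + |day1 - day2| ^ 2 else total_penalty)
            total_penalty)
          total_penalty)
        t
      = scs.foldl (fun total_penalty student_courses =>
        let st := student_courses.foldl (fun (acc : Int × Int × Int) course =>
          let day := (PySem.Dict.mk days).getD course (-1)
          if day ≠ -1 then (acc.1 + 1, acc.2.1 + day, acc.2.2 + day * day) else acc)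
          (0, 0, 0)
        total_penalty + st.1 * st.2.2 - st.2.1 * st.2.1)
        t from h 0
  intro t
  induction scs generalizing t with
  | nil => rfl
  | cons sc scs ih =>
    rw [List.foldl_cons, List.foldl_cons, ih]
    congr 1
    refine (pvOuter (fun c => (PySem.Dict.mk days).getD c (-1)) sc t).trans ?_
    rw [pvKey]
    have hB := pvStats (fun c => (PySem.Dict.mk days).getD c (-1)) sc 0 0 0
    simp only [zero_add] at hB
    rw [hB]
    ring
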